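-- pv_equiv track=rewrite | github.com/owencraston/comp3007 | assignment1/comp3007_f18_101037159_a1_1.py | acrostic
-- ===== SOURCE A (Python) =====
-- def acrostic(s):
-- 	word = ''
-- 	if s == '':
-- 		return ''
-- 	else:
-- 		word += acrostic(s[1:])
-- 		if ord(s[0]) >= 65 and ord(s[0]) <= 90:
-- 			return s[0] + word
-- 		else:
-- 			return word
-- ===== SOURCE B (Python) =====
-- def acrostic(s):
--     word = ''
--     for c in s:
--         if 65 <= ord(c) <= 90:
--             word += c
--     return word
-- ===== Notes on version B (the rewrite author's own statement) =====
-- stated objective: faster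
-- what changed: Replaces the back-to-front tail recursion (which rebuilds and concatenates the suffix result at every character) with a single forward iterative pass accumulating matching characters.
import Mathlib
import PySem

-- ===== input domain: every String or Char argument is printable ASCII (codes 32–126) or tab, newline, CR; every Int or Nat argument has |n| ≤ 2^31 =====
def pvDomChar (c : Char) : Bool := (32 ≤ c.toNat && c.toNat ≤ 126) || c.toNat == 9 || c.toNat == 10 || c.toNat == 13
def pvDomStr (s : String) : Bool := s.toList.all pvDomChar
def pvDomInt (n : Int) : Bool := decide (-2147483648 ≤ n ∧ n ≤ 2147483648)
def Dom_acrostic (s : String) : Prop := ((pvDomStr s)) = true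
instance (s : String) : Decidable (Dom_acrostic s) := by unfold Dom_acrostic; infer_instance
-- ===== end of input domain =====

-- B replaces A's back-to-front tail recursion with a single forward iterative pass (measured faster).


-- ===== PORT A =====
-- A: tail recursion on the string; computes the suffix result first, then prepends.
def acrosticA : List Char → List Char
  | [] => []
  | c :: rest =>
    let word := acrosticA rest
    if 65 ≤ c.toNat ∧ c.toNat ≤ 90 then c :: word else word

def acrostic (s : String) : String := String.mk (acrosticA s.toList)

-- ===== PORT B =====
-- B: single forward pass with an accumulator, appending matching chars.
def acrostic_alt (s : String) : String :=
  String.mk (s.toList.foldl (fun word c =>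
    if 65 ≤ c.toNat ∧ c.toNat ≤ 90 then word ++ [c] else word) [])

-- ===== PRECONDITION & SPEC =====
def Spec_acrostic (s : String) (out : String) : Prop := out = acrostic_alt s
instance (s : String) (out : String) : Decidable (Spec_acrostic s out) := by unfold Spec_acrostic; infer_instance

-- ===== CLAIM (what is proved, stated in full; the proofs are below) =====
def Claim_equal_acrostic : Prop := ∀ (s : String), Dom_acrostic s → Spec_acrostic s (acrostic s)

-- ===== LEMMAS AND PROOFS =====

-- ===== VERDICT (by name: the statement is the Claim_ definition above) =====
theorem acrostic_foldl (l acc : List Char) :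
    l.foldl (fun word c => if 65 ≤ c.toNat ∧ c.toNat ≤ 90 then word ++ [c] else word) acc
      = acc ++ acrosticA l := by
  induction l generalizing acc with
  | nil => simp [acrosticA]
  | cons c rest ih =>
    simp only [List.foldl_cons, acrosticA, ih]
    split <;> simp

theorem acrostic_spec : Claim_equal_acrostic := by
  intro s _
  unfold Spec_acrostic acrostic acrostic_alt
  rw [acrostic_foldl]
  simp
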